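-- pv_equiv track=rewrite | github.com/VolumeQuant/quant_py-main | param_tuning_sim.py | build_consecutive_days
-- ===== SOURCE A (Python) =====
-- def build_consecutive_days(all_rankings):
--     """For each date, compute how many consecutive ranking days each ticker has appeared."""
--     dates = sorted(all_rankings.keys())
--     # Build presence map
--     presence = {}
--     for date_str in dates:
--         tickers_today = {s['ticker'] for s in all_rankings[date_str]}
--         presence[date_str] = tickers_today
--
--     consec = {}  # {date_str: {ticker: consecutive_days}}
--     for i, date_str in enumerate(dates):
--         consec[date_str] = {}
--         for ticker in presence[date_str]:
--             if i == 0: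
--                 consec[date_str][ticker] = 1
--             else:
--                 prev_date = dates[i-1]
--                 if ticker in consec.get(prev_date, {}):
--                     consec[date_str][ticker] = consec[prev_date][ticker] + 1
--                 else:
--                     consec[date_str][ticker] = 1
--     return consec
-- ===== SOURCE B (Python) =====
-- def build_consecutive_days(all_rankings):
--     """For each date, compute how many consecutive ranking days each ticker has appeared."""
--     dates = sorted(all_rankings)
--     present = [{s['ticker'] for s in all_rankings[d]} for d in dates]
--     consec = {}
--     for i, d in enumerate(dates):
--         row = {}
--         for s in all_rankings[d]:
--             t = s['ticker']
--             j = i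
--             while j > 0 and t in present[j - 1]:
--                 j -= 1
--             row[t] = i - j + 1
--         consec[d] = row
--     return consec
-- ===== Notes on version B (the rewrite author's own statement) =====
-- stated objective: alternative
-- what changed: Instead of A's forward dynamic programming that carries streaks from day to day by reading the previous date's row back out of the growing consec table, B computes every streak independently and directly: it precomputes per-date ticker sets and, for each (date, ticker), scans backwards through those sets while the ticker stays present, the streak being the length of that backward run; no previous row or carried streak state exists.
import Mathlib
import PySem

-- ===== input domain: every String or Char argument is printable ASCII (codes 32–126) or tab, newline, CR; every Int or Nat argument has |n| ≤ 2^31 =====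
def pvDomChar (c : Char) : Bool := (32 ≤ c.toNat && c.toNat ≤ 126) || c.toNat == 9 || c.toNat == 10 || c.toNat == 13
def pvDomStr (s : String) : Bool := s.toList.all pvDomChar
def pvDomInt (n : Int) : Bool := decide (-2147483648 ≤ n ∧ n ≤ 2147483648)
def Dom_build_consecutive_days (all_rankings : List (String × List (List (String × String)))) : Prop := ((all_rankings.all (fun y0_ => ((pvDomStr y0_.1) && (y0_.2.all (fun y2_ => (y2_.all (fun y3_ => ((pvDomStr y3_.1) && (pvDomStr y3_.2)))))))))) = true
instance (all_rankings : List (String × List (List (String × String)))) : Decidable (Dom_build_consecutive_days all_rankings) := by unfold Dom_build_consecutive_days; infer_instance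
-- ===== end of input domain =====

-- B drops A's forward day-to-day streak propagation (reading the previous date's row out of the
-- growing consec table): it computes each (date, ticker) streak independently by scanning backwards
-- through precomputed per-date ticker sets while the ticker stays present — objective: alternative.

-- shared field access s['ticker'] (first-match lookup; Pre_ guarantees the key is present, so "" is unreachable)
def pvTicker (s : List (String × String)) : String := (PySem.Dict.mk s).getD "ticker" ""

-- ===== PORT A =====
def build_consecutive_days (all_rankings : List (String × List (List (String × String)))) : List (String × List (String × Int)) :=
  let rk := PySem.Dict.mk all_rankings
  let dates := PySem.List.sorted rk.keys (fun x => x) false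
  let presence : PySem.Dict String (PySem.Set String) :=
    dates.foldl (fun presence date_str =>
      presence.insert date_str (PySem.Set.ofList ((rk.getD date_str []).map pvTicker))) PySem.Dict.empty
  let consec : PySem.Dict String (PySem.Dict String Int) :=
    (PySem.List.enumerate dates).foldl (fun consec idate =>
      let consec := consec.insert idate.2 PySem.Dict.empty
      -- presence[date_str]: the key was inserted by the first loop, so the default is unreachable
      (presence.getD idate.2 PySem.Set.empty).foldl (fun consec ticker =>
        if idate.1 = 0 then
          consec.insert idate.2 ((consec.getD idate.2 PySem.Dict.empty).insert ticker 1)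
        else
          -- dates[i-1]: here 1 ≤ i < len(dates), so the index is in range and the "" default is unreachable
          let prev_date := (PySem.List.pyGet? dates (idate.1 - 1)).getD ""
          if (consec.getD prev_date PySem.Dict.empty).contains ticker then
            consec.insert idate.2 ((consec.getD idate.2 PySem.Dict.empty).insert ticker
              ((consec.getD prev_date PySem.Dict.empty).getD ticker 0 + 1))
          else
            consec.insert idate.2 ((consec.getD idate.2 PySem.Dict.empty).insert ticker 1)) consec)
      PySem.Dict.empty
  consec.items.map (fun p => (p.1, p.2.items))

-- ===== PORT B =====
-- the while loop 'while j > 0 and t in present[j - 1]: j -= 1' (j counts down from i, so structural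
-- recursion on the Nat j is exact; j - 1 is always in range 0 ≤ j-1 < i < len(present) here, so the
-- [] default of getD is unreachable)
def pvBackJ (present : List (PySem.Set String)) (t : String) : Nat → Nat
  | 0 => 0
  | j + 1 => if (present.getD j []).contains t then pvBackJ present t j else j + 1

def build_consecutive_days_alt (all_rankings : List (String × List (List (String × String)))) : List (String × List (String × Int)) :=
  let rk := PySem.Dict.mk all_rankings
  let dates := PySem.List.sorted rk.keys (fun x => x) false
  let present := dates.map (fun d => PySem.Set.ofList ((rk.getD d []).map pvTicker))
  let consec : PySem.Dict String (PySem.Dict String Int) :=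
    (PySem.List.enumerate dates).foldl (fun consec idate =>
      consec.insert idate.2
        ((rk.getD idate.2 []).foldl (fun row s =>
          let t := pvTicker s
          -- i from enumerate satisfies 0 ≤ i, so .toNat is exact here
          row.insert t (idate.1 - (pvBackJ present t idate.1.toNat : Int) + 1)) PySem.Dict.empty))
      PySem.Dict.empty
  consec.items.map (fun p => (p.1, p.2.items))

-- ===== PRECONDITION & SPEC =====
-- Pre_ excludes (a) inputs where some stock dict lacks the key 'ticker' (A raises KeyError there) and
-- (b) association lists with duplicate keys at either level, which no Python dict can represent.
def Pre_build_consecutive_days (all_rankings : List (String × List (List (String × String)))) : Prop :=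
  (all_rankings.map Prod.fst).Nodup ∧
  ∀ p ∈ all_rankings, ∀ s ∈ p.2, (s.map Prod.fst).Nodup ∧ (PySem.Dict.mk s).contains "ticker" = true
instance (all_rankings : List (String × List (List (String × String)))) : Decidable (Pre_build_consecutive_days all_rankings) := by unfold Pre_build_consecutive_days; infer_instance

def pvWitness_build_consecutive_days : (List (String × List (List (String × String)))) :=
  [("2024-01-01", [[("ticker", "AAPL")]]),
   ("2024-01-02", [[("ticker", "AAPL")], [("ticker", "MSFT")]])]

def Spec_build_consecutive_days (all_rankings : List (String × List (List (String × String)))) (out : List (String × List (String × Int))) : Prop := out = build_consecutive_days_alt all_rankings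
instance (all_rankings : List (String × List (List (String × String)))) (out : List (String × List (String × Int))) : Decidable (Spec_build_consecutive_days all_rankings out) := by unfold Spec_build_consecutive_days; infer_instance

-- ===== CLAIM (what is proved, stated in full; the proofs are below) =====
def Claim_equal_build_consecutive_days : Prop := ∀ (all_rankings : List (String × List (List (String × String)))), Dom_build_consecutive_days all_rankings → Pre_build_consecutive_days all_rankings → Spec_build_consecutive_days all_rankings (build_consecutive_days all_rankings)

-- ===== LEMMAS AND PROOFS =====

-- abbreviations for the loop bodies (A's outer step, B's outer step, and the rolling-streak step
-- of the intermediate form both are compared with), used only by the proofs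
def pvStepA (dates : List String) (presence : PySem.Dict String (PySem.Set String))
    (consec : PySem.Dict String (PySem.Dict String Int)) (idate : Int × String) :
    PySem.Dict String (PySem.Dict String Int) :=
  let consec := consec.insert idate.2 PySem.Dict.empty
  (presence.getD idate.2 PySem.Set.empty).foldl (fun consec ticker =>
    if idate.1 = 0 then
      consec.insert idate.2 ((consec.getD idate.2 PySem.Dict.empty).insert ticker 1)
    else
      let prev_date := (PySem.List.pyGet? dates (idate.1 - 1)).getD ""
      if (consec.getD prev_date PySem.Dict.empty).contains ticker then
        consec.insert idate.2 ((consec.getD idate.2 PySem.Dict.empty).insert ticker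
          ((consec.getD prev_date PySem.Dict.empty).getD ticker 0 + 1))
      else
        consec.insert idate.2 ((consec.getD idate.2 PySem.Dict.empty).insert ticker 1)) consec

def pvInner (rk : PySem.Dict String (List (List (String × String)))) (prev : PySem.Dict String Int)
    (date_str : String) : PySem.Dict String Int :=
  (rk.getD date_str []).foldl
    (fun cur s => cur.insert (pvTicker s) (prev.getD (pvTicker s) 0 + 1)) PySem.Dict.empty

def pvStepB (rk : PySem.Dict String (List (List (String × String))))
    (acc : PySem.Dict String (PySem.Dict String Int) × PySem.Dict String Int) (date_str : String) :
    PySem.Dict String (PySem.Dict String Int) × PySem.Dict String Int :=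
  let cur := (rk.getD date_str []).foldl
    (fun cur s => cur.insert (pvTicker s) (acc.2.getD (pvTicker s) 0 + 1)) PySem.Dict.empty
  (acc.1.insert date_str cur, cur)

def pvStepC (rk : PySem.Dict String (List (List (String × String)))) (present : List (PySem.Set String))
    (consec : PySem.Dict String (PySem.Dict String Int)) (idate : Int × String) :
    PySem.Dict String (PySem.Dict String Int) :=
  consec.insert idate.2
    ((rk.getD idate.2 []).foldl (fun row s =>
      row.insert (pvTicker s) (idate.1 - (pvBackJ present (pvTicker s) idate.1.toNat : Int) + 1))
      PySem.Dict.empty)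

lemma pv_enumerate_cons {α : Type} (x : α) (xs : List α) (n : Int) :
    PySem.List.enumerate (x :: xs) n = (n, x) :: PySem.List.enumerate xs (n + 1) := rfl


lemma pv_insert_insert {κ ν : Type} [BEq κ] [LawfulBEq κ] (d : PySem.Dict κ ν) (k : κ) (v v' : ν) :
    (d.insert k v).insert k v' = d.insert k v' := by
  by_cases h : d.contains k = true
  · have h2 : (d.insert k v).contains k = true := by
      rw [PySem.Dict.contains_insert]; simp
    have e1 := PySem.Dict.items_insert_of_contains (d.insert k v) v' h2
    have e2 := PySem.Dict.items_insert_of_contains d v h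
    have e3 := PySem.Dict.items_insert_of_contains d v' h
    cases hins : d.insert k v' with
    | mk items' =>
      cases hins2 : (d.insert k v).insert k v' with
      | mk items2 =>
        congr 1
        have : items2 = items' := by
          have h4 : items2 = ((d.insert k v).insert k v').items := by rw [hins2]
          have h5 : items' = (d.insert k v').items := by rw [hins]
          rw [h4, h5, e1, e3, e2, List.map_map]
          apply List.map_congr_left
          intro p _
          by_cases hp : p.1 == k
          · simp [hp]
          · simp [hp]
        exact this
  · have h1 := PySem.Dict.items_insert_of_not_contains d v (by simpa using h)
    have h2 : (d.insert k v).contains k = true := by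
      rw [PySem.Dict.contains_insert]; simp
    have e1 := PySem.Dict.items_insert_of_contains (d.insert k v) v' h2
    have e3 := PySem.Dict.items_insert_of_not_contains d v' (by simpa using h)
    have hmem : ∀ p ∈ d.items, (p.1 == k) = false := by
      intro p hp
      by_contra hc
      have : d.contains k = true := by
        unfold PySem.Dict.contains
        exact List.any_eq_true.mpr ⟨p, hp, by simpa using hc⟩
      exact h this
    cases hins : d.insert k v' with
    | mk items' =>
      cases hins2 : (d.insert k v).insert k v' with
      | mk items2 =>
        congr 1
        have h4 : items2 = ((d.insert k v).insert k v').items := by rw [hins2]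
        have h5 : items' = (d.insert k v').items := by rw [hins]
        rw [h4, h5, e1, e3, h1, List.map_append]
        congr 1
        · apply (List.map_congr_left ?_).trans (List.map_id _)
          intro p hp
          simp [hmem p hp]
        · simp


lemma pv_fold_insert_fun {ν : Type} (g : String → ν) :
    ∀ (ts s : List String),
      ts.foldl (fun c t => c.insert t (g t)) (PySem.Dict.mk (s.map (fun t => (t, g t))))
        = PySem.Dict.mk ((ts.foldl PySem.Set.add s).map (fun t => (t, g t))) := by
  intro ts
  induction ts with
  | nil => intro s; rfl
  | cons t ts ih =>
    intro s
    have hstep : (PySem.Dict.mk (s.map (fun t => (t, g t)))).insert t (g t)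
        = PySem.Dict.mk ((PySem.Set.add s t).map (fun t => (t, g t))) := by
      by_cases hmem : t ∈ s
      · have hc : (PySem.Dict.mk (s.map (fun t => (t, g t)))).contains t = true := by
          rw [PySem.Dict.contains_mk]
          refine List.any_eq_true.mpr ⟨(t, g t), List.mem_map.mpr ⟨t, hmem, rfl⟩, by simp⟩
        have hadd : PySem.Set.add s t = s := by
          unfold PySem.Set.add
          simp [List.contains_eq_mem, hmem]
        cases hd : (PySem.Dict.mk (s.map (fun t => (t, g t)))).insert t (g t) with
        | mk items2 =>
          rw [hadd]
          congr 1
          have h4 : items2 = ((PySem.Dict.mk (s.map (fun t => (t, g t)))).insert t (g t)).items := by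
            rw [hd]
          rw [h4, PySem.Dict.items_insert_of_contains _ _ hc]
          rw [List.map_map]
          apply List.map_congr_left
          intro x _
          by_cases hx : x == t
          · simp only [Function.comp]
            have : x = t := by simpa using hx
            simp [this]
          · simp only [Function.comp]
            simp at hx
            simp [hx]
      · have hc : (PySem.Dict.mk (s.map (fun t => (t, g t)))).contains t = false := by
          rw [PySem.Dict.contains_mk]
          simp only [List.any_eq_false]
          rintro ⟨a, b⟩ hab
          obtain ⟨x, hx, hxe⟩ := List.mem_map.mp hab
          cases hxe
          simp only [beq_iff_eq]
          rintro rfl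
          exact hmem hx
        have hadd : PySem.Set.add s t = s ++ [t] := by
          unfold PySem.Set.add
          simp [List.contains_eq_mem, hmem]
        cases hd : (PySem.Dict.mk (s.map (fun t => (t, g t)))).insert t (g t) with
        | mk items2 =>
          rw [hadd]
          congr 1
          have h4 : items2 = ((PySem.Dict.mk (s.map (fun t => (t, g t)))).insert t (g t)).items := by
            rw [hd]
          rw [h4, PySem.Dict.items_insert_of_not_contains _ _ hc]
          simp
    simp only [List.foldl_cons]
    rw [hstep, ih]

lemma pv_addAll_nodup : ∀ (S : List String), S.Nodup → S.foldl PySem.Set.add [] = S := by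
  have gen : ∀ (S s : List String), S.Nodup → (∀ x ∈ S, x ∉ s) → S.foldl PySem.Set.add s = s ++ S := by
    intro S
    induction S with
    | nil => intro s _ _; simp
    | cons t ts ih =>
      intro s hnd hdis
      have hadd : PySem.Set.add s t = s ++ [t] := by
        unfold PySem.Set.add
        simp [List.contains_eq_mem, hdis t (by simp)]
      simp only [List.foldl_cons]
      rw [hadd, ih (s ++ [t]) hnd.of_cons]
      · simp
      · intro x hx
        simp only [List.mem_append, List.mem_singleton]
        rintro (h | rfl)
        · exact hdis x (by simp [hx]) h
        · exact (List.nodup_cons.mp hnd).1 hx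
  intro S h
  simpa using gen S [] h (by simp)

-- a per-date row: folding inserts of t ↦ v t over the stock list builds the dict of the
-- deduplicated ticker list (first-occurrence order) mapped through v
lemma pv_row_eq (l : List (List (String × String))) (v : String → Int) :
    l.foldl (fun row s => row.insert (pvTicker s) (v (pvTicker s))) PySem.Dict.empty
      = PySem.Dict.mk ((PySem.Set.ofList (l.map pvTicker)).map (fun t => (t, v t))) := by
  rw [show l.foldl (fun row s => row.insert (pvTicker s) (v (pvTicker s))) PySem.Dict.empty
      = (l.map pvTicker).foldl (fun (row : PySem.Dict String Int) t => row.insert t (v t))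
          PySem.Dict.empty from by rw [List.foldl_map]]
  have := pv_fold_insert_fun v (l.map pvTicker) []
  simp only [List.map_nil] at this
  rw [show (PySem.Dict.empty : PySem.Dict String Int) = PySem.Dict.mk [] from rfl, this]
  rfl

lemma pv_getD_fold_insert_not_mem {ν : Type} (f : String → ν) (dflt : ν) :
    ∀ (ds : List String) (d : PySem.Dict String ν) (x : String), x ∉ ds →
      (ds.foldl (fun p k => p.insert k (f k)) d).getD x dflt = d.getD x dflt := by
  intro ds
  induction ds with
  | nil => intro d x _; rfl
  | cons k ks ih =>
    intro d x hx
    simp only [List.mem_cons, not_or] at hx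
    simp only [List.foldl_cons]
    rw [ih _ _ hx.2, PySem.Dict.getD_insert_of_ne _ _ _ hx.1]

lemma pv_getD_fold_insert_mem {ν : Type} (f : String → ν) (dflt : ν) :
    ∀ (ds : List String) (d : PySem.Dict String ν) (x : String), ds.Nodup → x ∈ ds →
      (ds.foldl (fun p k => p.insert k (f k)) d).getD x dflt = f x := by
  intro ds
  induction ds with
  | nil => intro d x _ h; simp at h
  | cons k ks ih =>
    intro d x hnd hx
    simp only [List.foldl_cons]
    rcases List.mem_cons.mp hx with rfl | hx'
    · rw [pv_getD_fold_insert_not_mem f dflt ks _ x (List.nodup_cons.mp hnd).1,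
        PySem.Dict.getD_insert_self]
    · exact ih _ _ hnd.of_cons hx'

lemma pv_hoist (date : String) (val : PySem.Dict String (PySem.Dict String Int) → String → Int)
    (c0 : PySem.Dict String (PySem.Dict String Int))
    (hval : ∀ e t, val (c0.insert date e) t = val c0 t) :
    ∀ (S : List String) (e0 : PySem.Dict String Int),
      S.foldl (fun c t => c.insert date ((c.getD date PySem.Dict.empty).insert t (val c t)))
          (c0.insert date e0)
        = c0.insert date (S.foldl (fun cur t => cur.insert t (val c0 t)) e0) := by
  intro S
  induction S with
  | nil => intro e0; rfl
  | cons t S ih =>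
    intro e0
    simp only [List.foldl_cons]
    rw [PySem.Dict.getD_insert_self, hval, pv_insert_insert, ih]

lemma pv_stepA_eq (dates : List String) (presence : PySem.Dict String (PySem.Set String))
    (rk : PySem.Dict String (List (List (String × String))))
    (cc : PySem.Dict String (PySem.Dict String Int)) (prev : PySem.Dict String Int)
    (i : Int) (date : String)
    (hpres : presence.getD date PySem.Set.empty = PySem.Set.ofList ((rk.getD date []).map pvTicker))
    (hprev0 : i = 0 → prev = PySem.Dict.empty)
    (hprev1 : i ≠ 0 → ∃ pd, (PySem.List.pyGet? dates (i - 1)).getD "" = pd ∧ pd ≠ date ∧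
        cc.getD pd PySem.Dict.empty = prev) :
    pvStepA dates presence cc (i, date) = cc.insert date (pvInner rk prev date) := by
  set ts := (rk.getD date []).map pvTicker with hts
  set g : String → Int := fun t => prev.getD t 0 + 1 with hg
  set val : PySem.Dict String (PySem.Dict String Int) → String → Int := fun c t =>
    if i = 0 then (1 : Int)
    else
      if (c.getD ((PySem.List.pyGet? dates (i - 1)).getD "") PySem.Dict.empty).contains t then
        (c.getD ((PySem.List.pyGet? dates (i - 1)).getD "") PySem.Dict.empty).getD t 0 + 1
      else 1
    with hval_def
  have hfun : (fun (consec : PySem.Dict String (PySem.Dict String Int)) ticker =>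
      if i = 0 then
        consec.insert date ((consec.getD date PySem.Dict.empty).insert ticker 1)
      else
        let prev_date := (PySem.List.pyGet? dates (i - 1)).getD ""
        if (consec.getD prev_date PySem.Dict.empty).contains ticker then
          consec.insert date ((consec.getD date PySem.Dict.empty).insert ticker
            ((consec.getD prev_date PySem.Dict.empty).getD ticker 0 + 1))
        else
          consec.insert date ((consec.getD date PySem.Dict.empty).insert ticker 1))
      = (fun c t => c.insert date ((c.getD date PySem.Dict.empty).insert t (val c t))) := by
    funext c t
    by_cases h : i = 0
    · simp [h, hval_def]
    · by_cases h2 : (c.getD ((PySem.List.pyGet? dates (i - 1)).getD "") PySem.Dict.empty).contains t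
      · simp [h, h2, hval_def]
      · simp [h, h2, hval_def]
  have hvalcc : ∀ t, val cc t = g t := by
    intro t
    by_cases h : i = 0
    · simp [hval_def, h, hprev0 h, hg, PySem.Dict.getD_empty]
    · obtain ⟨pd, hpd, hne, hgetd⟩ := hprev1 h
      simp only [hval_def, if_neg h, hpd, hgetd]
      by_cases h2 : prev.contains t
      · simp [h2, hg]
      · have : prev.get? t = none := (PySem.Dict.get?_eq_none_iff_contains prev t).mpr (by simpa using h2)
        simp [h2, hg, PySem.Dict.getD, this]
  have hval_ins : ∀ e t, val (cc.insert date e) t = val cc t := by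
    intro e t
    by_cases h : i = 0
    · simp [hval_def, h]
    · obtain ⟨pd, hpd, hne, _⟩ := hprev1 h
      simp only [hval_def, if_neg h, hpd, PySem.Dict.getD_insert_of_ne _ _ _ hne]
  show ((presence.getD date PySem.Set.empty).foldl _ (cc.insert date PySem.Dict.empty)) = _
  rw [hpres]
  rw [show (PySem.Set.empty : PySem.Set String) = [] from rfl] at *
  rw [hfun]
  rw [pv_hoist date val cc hval_ins]
  congr 1
  have hfun2 : (fun (cur : PySem.Dict String Int) t => cur.insert t (val cc t))
      = (fun (cur : PySem.Dict String Int) t => cur.insert t (g t)) := by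
    funext cur t; rw [hvalcc]
  rw [hfun2]
  have h1 : (PySem.Set.ofList ts).foldl (fun (cur : PySem.Dict String Int) t => cur.insert t (g t)) PySem.Dict.empty
      = PySem.Dict.mk ((PySem.Set.ofList ts).map (fun t => (t, g t))) := by
    have := pv_fold_insert_fun g (PySem.Set.ofList ts) []
    simp only [List.map_nil] at this
    rw [show (PySem.Dict.empty : PySem.Dict String Int) = PySem.Dict.mk [] from rfl]
    rw [this, pv_addAll_nodup _ (PySem.Set.nodup_ofList ts)]
  have h2 : pvInner rk prev date
      = PySem.Dict.mk ((PySem.Set.ofList ts).map (fun t => (t, g t))) := by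
    unfold pvInner
    rw [hts, hg]
    exact pv_row_eq (rk.getD date []) (fun t => prev.getD t 0 + 1)
  rw [h1, h2]

lemma pv_outer (rk : PySem.Dict String (List (List (String × String))))
    (dates : List String) (hnd : dates.Nodup)
    (presence : PySem.Dict String (PySem.Set String))
    (hpres : ∀ d ∈ dates, presence.getD d PySem.Set.empty
        = PySem.Set.ofList ((rk.getD d []).map pvTicker)) :
    ∀ (suffix : List String) (k : Nat) (cc : PySem.Dict String (PySem.Dict String Int))
      (prev : PySem.Dict String Int),
      dates.drop k = suffix →
      (k = 0 → prev = PySem.Dict.empty) →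
      (k ≠ 0 → ∃ h : k - 1 < dates.length, cc.getD (dates[k-1]'h) PySem.Dict.empty = prev) →
      (PySem.List.enumerate suffix (k : Int)).foldl (pvStepA dates presence) cc
        = (suffix.foldl (pvStepB rk) (cc, prev)).1 := by
  intro suffix
  induction suffix with
  | nil => intro k cc prev _ _ _; rfl
  | cons date rest ih =>
    intro k cc prev hdrop h0 h1
    have hklt : k < dates.length := by
      by_contra hge
      have : dates.drop k = [] := List.drop_eq_nil_of_le (by omega)
      rw [hdrop] at this; exact List.cons_ne_nil _ _ this
    have hdk : dates[k]'hklt = date := by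
      have h00 : (dates.drop k)[0]'(by rw [hdrop]; simp) = dates[k + 0]'(by omega) :=
        List.getElem_drop ..
      simp only [hdrop] at h00
      simpa using h00.symm
    have hrest : dates.drop (k+1) = rest := by
      rw [← List.tail_drop, hdrop]
      rfl
    rw [pv_enumerate_cons, List.foldl_cons, List.foldl_cons]
    have hstepA : pvStepA dates presence cc ((k : Int), date)
        = cc.insert date (pvInner rk prev date) := by
      apply pv_stepA_eq dates presence rk cc prev _ date
      · exact hpres date (by rw [← hdk]; exact List.getElem_mem _)
      · intro hi0
        exact h0 (by exact_mod_cast hi0)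
      · intro hi0
        have hk0 : k ≠ 0 := by exact_mod_cast fun h => hi0 (by rw [h]; rfl)
        obtain ⟨hlt, hget⟩ := h1 hk0
        refine ⟨dates[k-1]'hlt, ?_, ?_, hget⟩
        · have hcast : (k : Int) - 1 = ((k - 1 : Nat) : Int) := by omega
          rw [hcast, PySem.List.pyGet?_natCast, List.getElem?_eq_getElem hlt]
          rfl
        · rw [← hdk]
          intro he
          have := hnd.getElem_inj_iff.mp he
          omega
    have hstepB : pvStepB rk (cc, prev) date
        = (cc.insert date (pvInner rk prev date), pvInner rk prev date) := rfl
    rw [hstepA, hstepB]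
    have hcast : ((k : Int) + 1) = ((k + 1 : Nat) : Int) := by push_cast; ring
    rw [hcast]
    apply ih (k+1) _ _ hrest (by omega)
    intro _
    refine ⟨by omega, ?_⟩
    have : dates[(k+1)-1]'(by omega) = date := by simpa using hdk
    rw [this, PySem.Dict.getD_insert_self]

def pvDates (all_rankings : List (String × List (List (String × String)))) : List String :=
  PySem.List.sorted (PySem.Dict.mk all_rankings).keys (fun x => x) false

def pvPresence (all_rankings : List (String × List (List (String × String)))) :
    PySem.Dict String (PySem.Set String) :=
  (pvDates all_rankings).foldl (fun presence date_str =>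
    presence.insert date_str
      (PySem.Set.ofList (((PySem.Dict.mk all_rankings).getD date_str []).map pvTicker)))
    PySem.Dict.empty

-- the streak value the rolling dict holds for t before processing date index k
def pvPrevVal (P : List (PySem.Set String)) (k : Nat) (t : String) : Int :=
  if k = 0 then 0
  else if (P.getD (k-1) []).contains t then ((k : Int) - 1) - (pvBackJ P t (k-1) : Int) + 1 else 0

lemma pvBackJ_succ (present : List (PySem.Set String)) (t : String) (m : Nat) :
    pvBackJ present t (m + 1)
      = if (present.getD m []).contains t then pvBackJ present t m else m + 1 := rfl

lemma pv_getD_mk_map (g : String → Int) (l : List String) (t : String) :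
    (PySem.Dict.mk (l.map fun x => (x, g x))).getD t 0 = if l.contains t then g t else 0 := by
  induction l with
  | nil => simp [PySem.Dict.getD, PySem.Dict.get?]
  | cons x xs ih =>
    simp only [List.map_cons, PySem.Dict.getD, PySem.Dict.get?_mk_cons, List.contains_cons] at *
    by_cases h : x = t
    · subst h
      simp
    · have h1 : (x == t) = false := by simpa using h
      have h2 : (t == x) = false := by simpa using fun e => h e.symm
      simpa [h1, h2] using ih

-- the backward-scan value equals the rolling value, for every ticker
lemma pv_val_eq (P : List (PySem.Set String)) (k : Nat) (prev : PySem.Dict String Int)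
    (hprev : ∀ t, prev.getD t 0 = pvPrevVal P k t) (t : String) :
    (k : Int) - (pvBackJ P t k : Int) + 1 = prev.getD t 0 + 1 := by
  rw [hprev]
  cases k with
  | zero => simp [pvBackJ, pvPrevVal]
  | succ m =>
    rw [pvBackJ_succ]
    unfold pvPrevVal
    rw [if_neg (Nat.succ_ne_zero m), Nat.add_sub_cancel]
    split_ifs with h
    · push_cast
      ring
    · push_cast
      ring

-- the invariant is maintained: the next rolling dict realises pvPrevVal at k+1
lemma pv_prevVal_next (P : List (PySem.Set String)) (k : Nat) (prev : PySem.Dict String Int)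
    (ts : List String) (hP : P.getD k [] = PySem.Set.ofList ts)
    (hprev : ∀ t, prev.getD t 0 = pvPrevVal P k t) (t : String) :
    (PySem.Dict.mk ((PySem.Set.ofList ts).map (fun t => (t, prev.getD t 0 + 1)))).getD t 0
      = pvPrevVal P (k+1) t := by
  rw [pv_getD_mk_map]
  unfold pvPrevVal
  rw [if_neg (Nat.succ_ne_zero k), Nat.add_sub_cancel, hP]
  unfold PySem.Set.contains
  split_ifs with h
  · rw [← pv_val_eq P k prev hprev t]
    push_cast
    ring
  · rfl

-- the rolling fold equals B's enumerate fold with the backward scan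
lemma pv_roll_eq_back (rk : PySem.Dict String (List (List (String × String))))
    (dates : List String) (P : List (PySem.Set String))
    (hP : P = dates.map (fun d => PySem.Set.ofList ((rk.getD d []).map pvTicker))) :
    ∀ (suffix : List String) (k : Nat) (cc : PySem.Dict String (PySem.Dict String Int))
      (prev : PySem.Dict String Int),
      dates.drop k = suffix →
      (∀ t, prev.getD t 0 = pvPrevVal P k t) →
      (suffix.foldl (pvStepB rk) (cc, prev)).1
        = (PySem.List.enumerate suffix (k : Int)).foldl (pvStepC rk P) cc := by
  intro suffix
  induction suffix with
  | nil => intro k cc prev _ _; rfl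
  | cons date rest ih =>
    intro k cc prev hdrop hinv
    have hklt : k < dates.length := by
      by_contra hge
      have : dates.drop k = [] := List.drop_eq_nil_of_le (by omega)
      rw [hdrop] at this; exact List.cons_ne_nil _ _ this
    have hdk : dates[k]'hklt = date := by
      have h00 : (dates.drop k)[0]'(by rw [hdrop]; simp) = dates[k + 0]'(by omega) :=
        List.getElem_drop ..
      simp only [hdrop] at h00
      simpa using h00.symm
    have hrest : dates.drop (k+1) = rest := by
      rw [← List.tail_drop, hdrop]
      rfl
    have hPk : P.getD k [] = PySem.Set.ofList ((rk.getD date []).map pvTicker) := by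
      rw [hP, List.getD, List.getElem?_map, List.getElem?_eq_getElem hklt]
      simp [hdk]
    rw [pv_enumerate_cons, List.foldl_cons, List.foldl_cons]
    have hrow : pvInner rk prev date
        = PySem.Dict.mk ((PySem.Set.ofList ((rk.getD date []).map pvTicker)).map
            (fun t => (t, prev.getD t 0 + 1))) := by
      unfold pvInner
      exact pv_row_eq (rk.getD date []) (fun t => prev.getD t 0 + 1)
    have hstepC : pvStepC rk P cc ((k : Int), date)
        = cc.insert date (pvInner rk prev date) := by
      unfold pvStepC
      simp only [Int.toNat_natCast]
      rw [pv_row_eq (rk.getD date []) (fun t => (k : Int) - (pvBackJ P t k : Int) + 1), hrow]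
      congr 1
      apply PySem.Dict.ext
      apply List.map_congr_left
      intro t _
      rw [pv_val_eq P k prev hinv t]
    have hstepB : pvStepB rk (cc, prev) date
        = (cc.insert date (pvInner rk prev date), pvInner rk prev date) := rfl
    rw [hstepB, hstepC]
    have hcast : ((k : Int) + 1) = ((k + 1 : Nat) : Int) := by push_cast; ring
    rw [hcast]
    apply ih (k+1) _ _ hrest
    intro t
    rw [hrow]
    exact pv_prevVal_next P k prev _ hPk hinv t

-- A equals the rolling fold (on Pre_)
theorem pv_A_eq_roll :
    ∀ (all_rankings : List (String × List (List (String × String)))),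
      Pre_build_consecutive_days all_rankings →
      build_consecutive_days all_rankings
        = (((pvDates all_rankings).foldl (pvStepB (PySem.Dict.mk all_rankings))
            (PySem.Dict.empty, PySem.Dict.empty)).1).items.map (fun p => (p.1, p.2.items)) := by
  intro ar hpre
  obtain ⟨hnodup, -⟩ := hpre
  have hA : build_consecutive_days ar
      = ((PySem.List.enumerate (pvDates ar) 0).foldl
          (pvStepA (pvDates ar) (pvPresence ar)) PySem.Dict.empty).items.map
          (fun p => (p.1, p.2.items)) := rfl
  have hkeys : (PySem.Dict.mk ar).keys = ar.map Prod.fst := PySem.Dict.keys_mk ar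
  have hnd : (pvDates ar).Nodup := by
    have hperm := PySem.List.sorted_perm (PySem.Dict.mk ar).keys (fun x => x) false
    exact (hperm.nodup_iff).mpr (by rw [hkeys]; exact hnodup)
  have hpres : ∀ d ∈ pvDates ar, (pvPresence ar).getD d PySem.Set.empty
      = PySem.Set.ofList (((PySem.Dict.mk ar).getD d []).map pvTicker) := by
    intro d hd
    exact pv_getD_fold_insert_mem
      (fun d => PySem.Set.ofList (((PySem.Dict.mk ar).getD d []).map pvTicker))
      PySem.Set.empty (pvDates ar) PySem.Dict.empty d hnd hd
  rw [hA]
  have := pv_outer (PySem.Dict.mk ar) (pvDates ar) hnd (pvPresence ar) hpres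
    (pvDates ar) 0 PySem.Dict.empty PySem.Dict.empty rfl (fun _ => rfl) (fun h => absurd rfl h)
  rw [show ((0 : Nat) : Int) = (0 : Int) from rfl] at this
  rw [this]

-- B equals the rolling fold (unconditionally)
theorem pv_roll_eq_alt :
    ∀ (all_rankings : List (String × List (List (String × String)))),
      (((pvDates all_rankings).foldl (pvStepB (PySem.Dict.mk all_rankings))
          (PySem.Dict.empty, PySem.Dict.empty)).1).items.map (fun p => (p.1, p.2.items))
        = build_consecutive_days_alt all_rankings := by
  intro ar
  have hB : build_consecutive_days_alt ar
      = ((PySem.List.enumerate (pvDates ar) 0).foldl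
          (pvStepC (PySem.Dict.mk ar)
            ((pvDates ar).map (fun d => PySem.Set.ofList (((PySem.Dict.mk ar).getD d []).map pvTicker))))
          PySem.Dict.empty).items.map (fun p => (p.1, p.2.items)) := rfl
  rw [hB]
  have := pv_roll_eq_back (PySem.Dict.mk ar) (pvDates ar)
    ((pvDates ar).map (fun d => PySem.Set.ofList (((PySem.Dict.mk ar).getD d []).map pvTicker))) rfl
    (pvDates ar) 0 PySem.Dict.empty PySem.Dict.empty rfl
    (fun t => by simp [PySem.Dict.getD_empty, pvPrevVal])
  rw [show ((0 : Nat) : Int) = (0 : Int) from rfl] at this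
  rw [this]

-- ===== VERDICT (by name: the statement is the Claim_ definition above) =====
theorem build_consecutive_days_spec : Claim_equal_build_consecutive_days := by
  intro ar _ hpre
  show build_consecutive_days ar = build_consecutive_days_alt ar
  rw [pv_A_eq_roll ar hpre, pv_roll_eq_alt ar]
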